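-- pv_equiv track=rewrite | github.com/jdarov/todolist-py130 | args/hard.py | all_substrings
-- ===== SOURCE A (Python) =====
-- def all_substrings(string):
--     substrings = list()
--     for x in range(len(string)):
--         new_string = ''
--         for y in range(x, len(string), 2):
--             new_string += string[y]
--             substrings.append(new_string)
--     return substrings
-- ===== SOURCE B (Python) =====
-- def all_substrings(string):
--     substrings = []
--     for x in range(len(string)):
--         s = string[x::2]
--         for k in range(1, len(s) + 1):
--             substrings.append(s[:k])
--     return substrings
-- ===== Notes on version B (the rewrite author's own statement) =====
-- stated objective: simpler
-- what changed: Replaces A's character-by-character string accumulation over indices stepping by 2 with materializing the every-other-char slice string[x::2] once and emitting its prefixes s[:k].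
import Mathlib
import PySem

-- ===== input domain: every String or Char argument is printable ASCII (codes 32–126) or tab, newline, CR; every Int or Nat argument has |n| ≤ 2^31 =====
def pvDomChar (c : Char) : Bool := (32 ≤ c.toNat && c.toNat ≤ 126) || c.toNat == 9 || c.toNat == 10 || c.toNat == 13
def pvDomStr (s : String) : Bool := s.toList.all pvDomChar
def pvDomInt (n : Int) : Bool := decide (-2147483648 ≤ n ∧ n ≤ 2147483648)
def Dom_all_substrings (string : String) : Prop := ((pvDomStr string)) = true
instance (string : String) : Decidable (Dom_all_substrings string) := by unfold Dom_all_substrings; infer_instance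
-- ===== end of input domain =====

-- B replaces A's char-by-char accumulation over indices stepping by 2 with
-- materializing the slice string[x::2] once and emitting its prefixes (simpler).

-- ===== PORT A =====
def all_substrings (string : String) : List String :=
  let cs := string.toList
  (PySem.List.pyRange 0 (cs.length : Int) 1).foldl
    (fun substrings x =>
      ((PySem.List.pyRange x (cs.length : Int) 2).foldl
        (fun (st : List Char × List String) y =>
          let new_string := st.1 ++ [PySem.List.pyGetD cs y ' ']
          (new_string, st.2 ++ [String.ofList new_string]))
        ([], substrings)).2)
    []

-- ===== PORT B =====
def all_substrings_alt (string : String) : List String :=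
  let cs := string.toList
  (PySem.List.pyRange 0 (cs.length : Int) 1).foldl
    (fun substrings x =>
      let s := (PySem.List.slice? cs (some x) none 2).getD []
      (PySem.List.pyRange 1 ((s.length : Int) + 1) 1).foldl
        (fun subs k => subs ++ [String.ofList (PySem.List.slice s none (some k))])
        substrings)
    []

-- ===== PRECONDITION & SPEC =====
def Spec_all_substrings (string : String) (out : List String) : Prop := out = all_substrings_alt string
instance (string : String) (out : List String) : Decidable (Spec_all_substrings string out) := by unfold Spec_all_substrings; infer_instance

-- ===== CLAIM (what is proved, stated in full; the proofs are below) =====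
def Claim_equal_all_substrings : Prop := ∀ (string : String), Dom_all_substrings string → Spec_all_substrings string (all_substrings string)

-- ===== LEMMAS AND PROOFS =====

-- fold appending singletons is append-map
theorem pvFoldAppend {α β : Type} (f : α → β) (l : List α) (acc : List β) :
    l.foldl (fun a x => a ++ [f x]) acc = acc ++ l.map f := by
  induction l generalizing acc with
  | nil => simp
  | cons c t ih => simp [List.foldl_cons, ih]

-- A's inner accumulation over a char list produces the prefixes
theorem pvPrefixFold (L pre : List Char) (acc : List String) :
    L.foldl (fun (st : List Char × List String) c =>
        (st.1 ++ [c], st.2 ++ [String.ofList (st.1 ++ [c])])) (pre, acc)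
      = (pre ++ L, acc ++ (List.range L.length).map (fun k => String.ofList (pre ++ L.take (k+1)))) := by
  induction L generalizing pre acc with
  | nil => simp
  | cons c t ih =>
    simp only [List.foldl_cons, ih, List.length_cons, List.range_succ_eq_map,
      List.map_cons, List.map_map]
    refine Prod.ext (by simp) ?_
    simp only [List.take_succ_cons, List.take_zero, List.append_assoc,
      List.singleton_append, List.append_cancel_left_eq, List.cons.injEq]
    refine ⟨trivial, ?_⟩
    apply List.map_congr_left
    intro k _
    simp

-- the chars A visits at start x are exactly B's slice string[x::2]
theorem pvSliceChars (cs : List Char) (x : Int) (hx : 0 ≤ x) :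
    (PySem.List.slice? cs (some x) none 2).getD []
      = (PySem.List.pyRange x (cs.length : Int) 2).map (fun y => PySem.List.pyGetD cs y ' ') := by
  have hx0 : ¬ x < (0:Int) := by omega
  simp only [PySem.List.slice?, PySem.List.sliceIndices, PySem.List.pyRange, if_neg hx0]
  norm_num
  by_cases hxl : x ≤ (cs.length : Int)
  · rw [min_eq_left hxl]
    by_cases hlt : x < (cs.length : Int)
    · apply List.filterMap_eq_map_iff_forall_eq_some.mpr
      intro k hk
      simp only [List.mem_range] at hk
      rw [if_pos hlt] at hk
      have hk' : (k : Int) < ((cs.length : Int) - x + 2 - 1) / 2 := by omega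
      have hklt : (x + 2 * (k : Int)).toNat < cs.length := by omega
      simp only [Function.comp]
      rw [List.getElem?_eq_getElem hklt,
        PySem.List.pyGetD_eq_getElem cs ' ' (by omega) (by omega)]
    · simp [hlt]
  · have h1 : ¬ x < (cs.length : Int) := by omega
    rw [min_eq_right (by omega)]
    simp [h1]

-- ===== VERDICT (by name: the statement is the Claim_ definition above) =====
theorem all_substrings_spec : Claim_equal_all_substrings := by
  intro string _
  unfold Spec_all_substrings all_substrings all_substrings_alt
  apply PySem.List.foldl_congr_mem
  intro acc x hxmem
  have hx : 0 ≤ x := (PySem.List.mem_pyRange_one.mp hxmem).1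
  rw [pvSliceChars string.toList x hx, pvFoldAppend]
  have hA : (PySem.List.pyRange x (string.toList.length : Int) 2).foldl
      (fun (st : List Char × List String) y =>
        (st.1 ++ [PySem.List.pyGetD string.toList y ' '],
         st.2 ++ [String.ofList (st.1 ++ [PySem.List.pyGetD string.toList y ' '])]))
      ([], acc)
      = ((PySem.List.pyRange x (string.toList.length : Int) 2).map
          (fun y => PySem.List.pyGetD string.toList y ' ')).foldl
        (fun (st : List Char × List String) c =>
          (st.1 ++ [c], st.2 ++ [String.ofList (st.1 ++ [c])])) ([], acc) := by
    rw [List.foldl_map]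
  rw [hA, pvPrefixFold]
  set L := (PySem.List.pyRange x (string.toList.length : Int) 2).map
      (fun y => PySem.List.pyGetD string.toList y ' ') with hL
  simp only [List.nil_append]
  congr 1
  rw [PySem.List.pyRange_one, List.map_map]
  have hlen : (((L.length : Int) + 1 - 1)).toNat = L.length := by omega
  rw [hlen]
  apply List.map_congr_left
  intro k hk
  simp only [Function.comp]
  rw [PySem.List.slice_to L (by omega : (0:Int) ≤ 1 + (k : Int))]
  congr 1
  congr 1
  omega
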